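-- pv_equiv track=rewrite | github.com/kaushal4/dsa | 3595-rearrange-k-substrings-to-form-target-string/rearrange-k-substrings-to-form-target-string.py | isPossibleToRearrange
-- ===== SOURCE A (Python) =====
-- def isPossibleToRearrange(s: str, t: str, k: int) -> bool:
--     freq:Dict[str, int] = {}
--     n = len(t)
--     i = 0
--     k = n // k
--     while i < n:
--         chunk = t[i: i+k]
--         if chunk in freq:
--             freq[chunk] += 1
--         else:
--             freq[chunk] = 1
--         i = i + k
--
--     i = 0
--     while i < n:
--         chunk = s[i: i+k]
--         if chunk in freq and freq[chunk] > 0: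
--             freq[chunk] -= 1
--         else:
--             return False
--         i = i + k
--     return True
-- ===== SOURCE B (Python) =====
-- def isPossibleToRearrange(s: str, t: str, k: int) -> bool:
--     n = len(t)
--     cs = n // k
--     if cs <= 0:
--         return n == 0
--     idx = range(0, n, cs)
--     chunks_t = [t[i:i + cs] for i in idx]
--     chunks_s = [s[i:i + cs] for i in idx]
--     return sorted(chunks_s) == sorted(chunks_t)
-- ===== Notes on version B (the rewrite author's own statement) =====
-- stated objective: idiomatic
-- what changed: Replaces A's two while-loops with a frequency dict (count t's chunks, then decrement per s-chunk) by slicing both strings over the same range and comparing the sorted chunk lists, i.e. multiset equality via sort-then-compare instead of count-then-decrement.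
import Mathlib
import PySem

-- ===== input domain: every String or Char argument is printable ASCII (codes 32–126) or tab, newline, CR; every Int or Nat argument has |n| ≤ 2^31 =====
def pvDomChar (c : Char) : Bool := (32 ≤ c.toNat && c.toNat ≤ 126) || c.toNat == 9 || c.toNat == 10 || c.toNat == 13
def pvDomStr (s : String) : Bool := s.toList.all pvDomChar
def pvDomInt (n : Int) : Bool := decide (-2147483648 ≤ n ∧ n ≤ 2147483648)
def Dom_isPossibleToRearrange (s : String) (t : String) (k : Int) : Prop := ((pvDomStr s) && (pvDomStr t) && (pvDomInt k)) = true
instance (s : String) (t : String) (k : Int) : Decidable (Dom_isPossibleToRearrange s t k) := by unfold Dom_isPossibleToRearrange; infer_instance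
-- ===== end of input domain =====

-- B replaces A's count-then-decrement frequency dict by comparing the two sorted chunk lists (idiomatic multiset equality).

-- ===== PORT A =====
-- first while-loop: count t's chunks into freq (fuel makes the while total; under Pre_ the fuel is never exhausted)
def pvALoop1 (t : String) (n c : Int) : Nat → Int → PySem.Dict String Int → PySem.Dict String Int
  | 0, _, freq => freq
  | fuel + 1, i, freq =>
    if i < n then
      let chunk := PySem.Str.slice t (some i) (some (i + c))
      pvALoop1 t n c fuel (i + c)
        (if freq.contains chunk then freq.insert chunk (freq.getD chunk 0 + 1)
         else freq.insert chunk 1)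
    else freq

-- second while-loop: decrement freq per chunk of s, early-return False
def pvALoop2 (s : String) (n c : Int) : Nat → Int → PySem.Dict String Int → Bool
  | 0, _, _ => true
  | fuel + 1, i, freq =>
    if i < n then
      let chunk := PySem.Str.slice s (some i) (some (i + c))
      if freq.contains chunk && decide (0 < freq.getD chunk 0) then
        pvALoop2 s n c fuel (i + c) (freq.insert chunk (freq.getD chunk 0 - 1))
      else false
    else true

def isPossibleToRearrange (s : String) (t : String) (k : Int) : Bool :=
  let n := PySem.Str.len t
  let c := PySem.Int.floordiv n k
  let freq := pvALoop1 t n c (n.toNat + 1) 0 PySem.Dict.empty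
  pvALoop2 s n c (n.toNat + 1) 0 freq

-- ===== PORT B =====
def isPossibleToRearrange_alt (s : String) (t : String) (k : Int) : Bool :=
  let n := PySem.Str.len t
  let cs := PySem.Int.floordiv n k
  if cs ≤ 0 then decide (n = 0)
  else
    let idx := PySem.List.pyRange 0 n cs
    let chunksT := idx.map (fun i => PySem.Str.slice t (some i) (some (i + cs)))
    let chunksS := idx.map (fun i => PySem.Str.slice s (some i) (some (i + cs)))
    decide (PySem.List.sorted chunksS (fun x => x) false = PySem.List.sorted chunksT (fun x => x) false)

-- ===== PRECONDITION & SPEC =====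
-- Pre_ excludes exactly the inputs where the Python A does not return: k = 0 (ZeroDivisionError on n // k)
-- and non-empty t with chunk step n // k ≤ 0, where A's while-loops never advance i past n (infinite loop).
def Pre_isPossibleToRearrange (s : String) (t : String) (k : Int) : Prop :=
  k ≠ 0 ∧ (PySem.Str.len t = 0 ∨ 1 ≤ PySem.Int.floordiv (PySem.Str.len t) k)
instance (s : String) (t : String) (k : Int) : Decidable (Pre_isPossibleToRearrange s t k) := by
  unfold Pre_isPossibleToRearrange; infer_instance

def pvWitness_isPossibleToRearrange : String × String × Int := ("abab", "baab", 2)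

def Spec_isPossibleToRearrange (s : String) (t : String) (k : Int) (out : Bool) : Prop := out = isPossibleToRearrange_alt s t k
instance (s : String) (t : String) (k : Int) (out : Bool) : Decidable (Spec_isPossibleToRearrange s t k out) := by unfold Spec_isPossibleToRearrange; infer_instance

-- ===== CLAIM (what is proved, stated in full; the proofs are below) =====
def Claim_equal_isPossibleToRearrange : Prop := ∀ (s : String) (t : String) (k : Int), Dom_isPossibleToRearrange s t k → Pre_isPossibleToRearrange s t k → Spec_isPossibleToRearrange s t k (isPossibleToRearrange s t k)

-- ===== LEMMAS AND PROOFS =====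

theorem pvFloordiv_zero (k : Int) : PySem.Int.floordiv 0 k = 0 := by
  simp [PySem.Int.floordiv]

-- pyRange with a positive step, structurally
theorem pvPyRange_pos_nil {a b c : Int} (hc : 0 < c) (h : b ≤ a) :
    PySem.List.pyRange a b c = [] := by
  rw [PySem.List.pyRange_of_pos a b hc, if_neg (by omega)]
  simp

theorem pvPyRange_pos_cons {a b c : Int} (hc : 0 < c) (h : a < b) :
    PySem.List.pyRange a b c = a :: PySem.List.pyRange (a + c) b c := by
  rw [PySem.List.pyRange_of_pos a b hc, PySem.List.pyRange_of_pos (a + c) b hc, if_pos h]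
  have hcount : ((b - a + c - 1) / c).toNat
      = (if a + c < b then ((b - (a + c) + c - 1) / c).toNat else 0) + 1 := by
    by_cases hb : a + c < b
    · rw [if_pos hb]
      have he : b - a + c - 1 = (b - (a + c) + c - 1) + 1 * c := by ring
      rw [he, Int.add_mul_ediv_right _ _ (by omega : c ≠ 0)]
      have hnn : 0 ≤ (b - (a + c) + c - 1) / c := Int.ediv_nonneg (by omega) (by omega)
      omega
    · rw [if_neg hb]
      have he : b - a + c - 1 = (b - a - 1) + 1 * c := by ring
      have h1 : (b - a + c - 1) / c = 1 := by
        rw [he, Int.add_mul_ediv_right _ _ (by omega : c ≠ 0),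
          Int.ediv_eq_zero_of_lt (by omega) (by omega)]
        norm_num
      omega
  rw [hcount, List.range_succ_eq_map]
  simp only [List.map_cons, List.map_map, Nat.cast_zero, mul_zero, add_zero]
  refine congrArg (a :: ·) (List.map_congr_left fun j _ => ?_)
  simp only [Function.comp_apply]
  push_cast
  ring

-- proof-only recursion mirroring A's second loop over an explicit chunk list
def pvCheck : List String → PySem.Dict String Int → Bool
  | [], _ => true
  | x :: xs, d =>
    if d.contains x && decide (0 < d.getD x 0) then pvCheck xs (d.insert x (d.getD x 0 - 1))
    else false

theorem pvALoop1_eq (t : String) (n c : Int) (hc : 0 < c) :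
    ∀ (fuel : Nat) (i : Int) (freq : PySem.Dict String Int), (n - i).toNat < fuel →
      pvALoop1 t n c fuel i freq
        = (PySem.List.pyRange i n c).foldl
            (fun d j =>
              let chunk := PySem.Str.slice t (some j) (some (j + c))
              if d.contains chunk then d.insert chunk (d.getD chunk 0 + 1) else d.insert chunk 1)
            freq := by
  intro fuel
  induction fuel with
  | zero => intro i freq h; omega
  | succ f ih =>
    intro i freq h
    by_cases hin : i < n
    · rw [pvALoop1, if_pos hin, pvPyRange_pos_cons hc hin, List.foldl_cons]
      exact ih (i + c) _ (by omega)
    · rw [pvALoop1, if_neg hin, pvPyRange_pos_nil hc (by omega), List.foldl_nil]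

theorem pvALoop2_eq (s : String) (n c : Int) (hc : 0 < c) :
    ∀ (fuel : Nat) (i : Int) (freq : PySem.Dict String Int), (n - i).toNat < fuel →
      pvALoop2 s n c fuel i freq
        = pvCheck ((PySem.List.pyRange i n c).map
            (fun j => PySem.Str.slice s (some j) (some (j + c)))) freq := by
  intro fuel
  induction fuel with
  | zero => intro i freq h; omega
  | succ f ih =>
    intro i freq h
    by_cases hin : i < n
    · rw [pvALoop2, if_pos hin, pvPyRange_pos_cons hc hin, List.map_cons, pvCheck]
      dsimp only
      split_ifs with hcond
      · exact ih (i + c) _ (by omega)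
      · rfl
    · rw [pvALoop2, if_neg hin, pvPyRange_pos_nil hc (by omega), List.map_nil, pvCheck]

theorem pvCheck_spec : ∀ (l : List String) (d : PySem.Dict String Int),
    (pvCheck l d = true ↔ ∀ x ∈ l, (l.count x : Int) ≤ d.getD x 0) := by
  intro l
  induction l with
  | nil => intro d; simp [pvCheck]
  | cons x xs ih =>
    intro d
    rw [pvCheck]
    by_cases hcond : (d.contains x && decide (0 < d.getD x 0)) = true
    · obtain ⟨hc1, hc2⟩ := Bool.and_eq_true_iff.mp hcond
      have hpos : 0 < d.getD x 0 := of_decide_eq_true hc2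
      rw [if_pos hcond, ih]
      constructor
      · intro hf y hy
        by_cases hyx : y = x
        · subst hyx
          rw [List.count_cons_self]
          by_cases hx : y ∈ xs
          · have := hf y hx
            rw [PySem.Dict.getD_insert_self] at this
            push_cast
            omega
          · rw [List.count_eq_zero_of_not_mem hx]
            push_cast
            omega
        · have hyxs : y ∈ xs := (List.mem_cons.mp hy).resolve_left hyx
          have := hf y hyxs
          rw [PySem.Dict.getD_insert_of_ne _ _ _ hyx] at this
          rw [List.count_cons_of_ne (Ne.symm hyx)]
          exact this
      · intro hall y hy
        by_cases hyx : y = x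
        · subst hyx
          rw [PySem.Dict.getD_insert_self]
          have := hall y (List.mem_cons_self)
          rw [List.count_cons_self] at this
          push_cast at this ⊢
          omega
        · have := hall y (List.mem_cons_of_mem _ hy)
          rw [List.count_cons_of_ne (Ne.symm hyx)] at this
          rw [PySem.Dict.getD_insert_of_ne _ _ _ hyx]
          exact this
    · rw [if_neg hcond]
      simp only [Bool.false_eq_true, false_iff]
      intro hall
      have hx := hall x List.mem_cons_self
      rw [List.count_cons_self] at hx
      have hpos : 0 < d.getD x 0 := by push_cast at hx; omega
      have hcont : d.contains x = true := by
        by_contra hnc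
        rw [PySem.Dict.getD_of_not_contains d 0 (by simpa using hnc)] at hpos
        omega
      rw [hcont] at hcond
      simp [hpos] at hcond

-- the counting step of A's first loop is always insert (getD + 1)
theorem pvStep1_eq (d : PySem.Dict String Int) (x : String) :
    (if d.contains x then d.insert x (d.getD x 0 + 1) else d.insert x 1)
      = d.insert x (d.getD x 0 + 1) := by
  by_cases h : d.contains x = true
  · rw [if_pos h]
  · rw [if_neg h, PySem.Dict.getD_of_not_contains d 0 (by simpa using h), zero_add]

theorem pvPerm_of_counts {l m : List String} (hlen : l.length = m.length)
    (h : ∀ x ∈ l, l.count x ≤ m.count x) : l.Perm m := by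
  rw [← Multiset.coe_eq_coe]
  apply Multiset.eq_of_le_of_card_le
  · rw [Multiset.le_iff_count]
    intro a
    by_cases ha : a ∈ l
    · simpa [Multiset.coe_count] using h a ha
    · simp [Multiset.coe_count, List.count_eq_zero_of_not_mem ha]
  · simp [hlen]

-- ===== VERDICT (by name: the statement is the Claim_ definition above) =====
theorem isPossibleToRearrange_spec : Claim_equal_isPossibleToRearrange := by
  intro s t k _hDom hPre
  obtain ⟨hk, hPre2⟩ := hPre
  unfold Spec_isPossibleToRearrange isPossibleToRearrange isPossibleToRearrange_alt
  simp only []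
  rcases hPre2 with hn0 | hc1
  · -- empty t: A's loops never run, B takes the cs ≤ 0 branch
    rw [hn0, pvFloordiv_zero]
    norm_num [pvALoop1, pvALoop2]
  · -- chunk step c ≥ 1
    set n := PySem.Str.len t with hn
    set c := PySem.Int.floordiv n k with hc
    have hcpos : (0 : Int) < c := by omega
    rw [if_neg (by omega)]
    rw [pvALoop1_eq t n c hcpos _ 0 _ (by omega),
        pvALoop2_eq s n c hcpos _ 0 _ (by omega)]
    have hfn : (fun (d : PySem.Dict String Int) (j : Int) =>
        let chunk := PySem.Str.slice t (some j) (some (j + c))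
        if d.contains chunk then d.insert chunk (d.getD chunk 0 + 1) else d.insert chunk 1)
        = fun d j => d.insert (PySem.Str.slice t (some j) (some (j + c)))
            (d.getD (PySem.Str.slice t (some j) (some (j + c))) 0 + 1) := by
      funext d j
      exact pvStep1_eq d _
    have hfold := List.foldl_map (f := fun j => PySem.Str.slice t (some j) (some (j + c)))
      (g := fun (d : PySem.Dict String Int) chunk => d.insert chunk (d.getD chunk 0 + 1))
      (l := PySem.List.pyRange 0 n c) (init := PySem.Dict.empty)
    rw [hfn, ← hfold]
    set chunksT := (PySem.List.pyRange 0 n c).map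
      (fun j => PySem.Str.slice t (some j) (some (j + c))) with hT
    set chunksS := (PySem.List.pyRange 0 n c).map
      (fun j => PySem.Str.slice s (some j) (some (j + c))) with hS
    have hgetD : ∀ x, (chunksT.foldl (fun d chunk => d.insert chunk (d.getD chunk 0 + 1))
        PySem.Dict.empty).getD x 0 = (chunksT.count x : Int) := by
      intro x
      rw [PySem.Dict.getD_foldl_insert_add_one, PySem.Dict.getD_empty, zero_add]
    rw [Bool.eq_iff_iff, pvCheck_spec, decide_eq_true_eq,
        PySem.List.sorted_id_eq_sorted_id_iff_perm]
    constructor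
    · intro h
      refine pvPerm_of_counts (by simp [hS, hT]) ?_
      intro x hx
      have := h x hx
      rw [hgetD] at this
      exact_mod_cast this
    · intro hperm x hx
      rw [hgetD, hperm.count_eq]
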